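-- pv_equiv track=rewrite | github.com/agrim-aggarwal/agrim_modules | agrim_modules/dataframes/excel.py | get_unrepeated_header_row
-- ===== SOURCE A (Python) =====
-- def get_unrepeated_header_row(header_row, startrow, startcol):
--     """
--     Process a header row to identify consecutive duplicate values for merging.
--
--     This function analyzes a header row and identifies sequences of identical
--     values that should be merged into single cells in Excel. It returns a
--     modified header row with duplicates replaced by empty strings, along with
--     merge range information.
--
--     Args:
--         header_row (list): List of header values to process
--         startrow (int): The Excel row number where this header will be written
--         startcol (int): The Excel column number where the header starts
--
--     Returns:
--         tuple: A tuple containing: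
--             - header_final (list): Modified header row with duplicates as empty strings
--             - merge_ranges (list): List of merge range tuples in format
--                                   (row, start_col, end_col, value)
--
--     Example:
--         >>> get_unrepeated_header_row(['Sales', 'Sales', 'Profit'], 0, 0)
--         (['Sales', '', 'Profit'], [(0, 0, 1, 'Sales')])
--
--     Note:
--         - Only consecutive duplicate values are merged
--         - The first occurrence retains the value, subsequent duplicates become ''
--         - Merge ranges are only created when there are 2+ consecutive duplicates
--     """
--     merge_ranges = []
--     header_final = []
--     i = 0
--     mergestart = None
--     mergevalue = ''
--
--     # Compare each entry with the previous one
--     # Prepend empty string to create entry_prev for first element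
--     for entry, entry_prev in zip(header_row, [''] + header_row[:-1]):
--         if entry == entry_prev:
--             # Duplicate found - add empty string to header
--             header_final.append('')
--         else:
--             # New value encountered
--             # If we were tracking a merge range, save it
--             if (mergestart is not None) and (i + startcol - 1 > mergestart):
--                 merge_ranges.append((startrow, mergestart, startcol + i - 1, mergevalue))
--
--             # Start tracking new potential merge range
--             mergestart = startcol + i
--             mergevalue = entry
--             header_final.append(entry)
--
--         i += 1
--
--     # Handle final merge range if it exists
--     if (mergestart is not None) and (i + startcol - 1 > mergestart):
--         merge_ranges.append((startrow, mergestart, startcol + i - 1, mergevalue))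
--
--     return (header_final, merge_ranges)
-- ===== SOURCE B (Python) =====
-- def get_unrepeated_header_row(header_row, startrow, startcol):
--     # Run-length decomposition: split into runs of consecutive equal values,
--     # then emit header cells and merge ranges per run in one pass.
--     runs = []
--     i = 0
--     n = len(header_row)
--     while i < n:
--         j = i
--         while j < n and header_row[j] == header_row[i]:
--             j += 1
--         runs.append((header_row[i], j - i))
--         i = j
--     header_final = []
--     merge_ranges = []
--     col = 0
--     prev = ''
--     for v, L in runs:
--         header_final.append(v)
--         header_final.extend([''] * (L - 1))
--         if L >= 2 and v != prev:
--             merge_ranges.append((startrow, startcol + col, startcol + col + L - 1, v))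
--         prev = v
--         col += L
--     return (header_final, merge_ranges)
-- ===== Notes on version B (the rewrite author's own statement) =====
-- stated objective: alternative
-- what changed: B first run-length-encodes the header into (value, length) runs, then emits header cells and merge ranges per run in a single pass with a prev sentinel, instead of A's element-by-element zip-with-previous scan carrying a pending mergestart/mergevalue state that is flushed at the next boundary and after the loop.
import Mathlib
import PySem

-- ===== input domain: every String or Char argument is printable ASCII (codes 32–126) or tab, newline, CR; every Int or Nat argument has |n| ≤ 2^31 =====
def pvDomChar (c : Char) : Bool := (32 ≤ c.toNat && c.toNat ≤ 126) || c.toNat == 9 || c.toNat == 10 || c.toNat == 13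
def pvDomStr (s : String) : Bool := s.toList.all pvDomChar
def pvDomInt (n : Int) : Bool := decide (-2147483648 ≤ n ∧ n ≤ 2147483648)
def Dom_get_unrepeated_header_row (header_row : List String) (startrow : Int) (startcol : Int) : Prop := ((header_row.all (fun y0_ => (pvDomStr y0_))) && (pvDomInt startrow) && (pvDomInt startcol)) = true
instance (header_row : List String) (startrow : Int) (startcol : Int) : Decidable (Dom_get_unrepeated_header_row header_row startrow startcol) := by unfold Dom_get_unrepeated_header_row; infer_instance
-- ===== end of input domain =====

-- B re-implements A by run-length encoding the header into (value, length) runs and emitting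
-- header cells / merge ranges per run with a prev sentinel (alternative decomposition, same cost).


-- ===== PORT A =====
-- loop body of A's `for entry, entry_prev in zip(header_row, [''] + header_row[:-1])`
def stepA (startrow startcol : Int)
    (s : Int × Option Int × String × List String × List (Int × Int × Int × String))
    (p : String × String) : Int × Option Int × String × List String × List (Int × Int × Int × String) :=
  match s, p with
  | (i, ms, mv, hf, mr), (entry, entry_prev) =>
    if entry = entry_prev then
      (i + 1, ms, mv, hf ++ [""], mr)
    else
      let mr' := match ms with
        | some m => if i + startcol - 1 > m then mr ++ [(startrow, m, startcol + i - 1, mv)] else mr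
        | none => mr
      (i + 1, some (startcol + i), entry, hf ++ [entry], mr')

def get_unrepeated_header_row (header_row : List String) (startrow : Int) (startcol : Int) : List String × (List (Int × Int × Int × String)) :=
  match (header_row.zip ("" :: header_row.dropLast)).foldl (stepA startrow startcol)
      (0, none, "", [], []) with
  | (i, ms, mv, hf, mr) =>
    (hf, match ms with
         | some m => if i + startcol - 1 > m then mr ++ [(startrow, m, startcol + i - 1, mv)] else mr
         | none => mr)

-- ===== PORT B =====
-- run-length encoding: B's first while-loop (scan the current run, continue after it)
def runsOf : List String → List (String × Nat)
  | [] => []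
  | x :: xs => (x, (xs.takeWhile (· == x)).length + 1) :: runsOf (xs.dropWhile (· == x))
termination_by xs => xs.length
decreasing_by
  exact Nat.lt_succ_of_le (List.length_dropWhile_le _ _)

-- loop body of B's `for v, L in runs`
def stepB (startrow startcol : Int)
    (s : Int × String × List String × List (Int × Int × Int × String))
    (p : String × Nat) : Int × String × List String × List (Int × Int × Int × String) :=
  match s, p with
  | (col, prev, hf, mr), (v, L) =>
    (col + (L : Int), v,
     hf ++ [v] ++ List.replicate (L - 1) "",
     if 2 ≤ L ∧ v ≠ prev then mr ++ [(startrow, startcol + col, startcol + col + (L : Int) - 1, v)] else mr)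

def get_unrepeated_header_row_alt (header_row : List String) (startrow : Int) (startcol : Int) : List String × (List (Int × Int × Int × String)) :=
  match (runsOf header_row).foldl (stepB startrow startcol) (0, "", [], []) with
  | (_, _, hf, mr) => (hf, mr)

-- ===== PRECONDITION & SPEC =====
def Spec_get_unrepeated_header_row (header_row : List String) (startrow : Int) (startcol : Int) (out : List String × (List (Int × Int × Int × String))) : Prop := out = get_unrepeated_header_row_alt header_row startrow startcol
instance (header_row : List String) (startrow : Int) (startcol : Int) (out : List String × (List (Int × Int × Int × String))) : Decidable (Spec_get_unrepeated_header_row header_row startrow startcol out) := by unfold Spec_get_unrepeated_header_row; infer_instance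

-- ===== CLAIM (what is proved, stated in full; the proofs are below) =====
def Claim_equal_get_unrepeated_header_row : Prop := ∀ (header_row : List String) (startrow : Int) (startcol : Int), Dom_get_unrepeated_header_row header_row startrow startcol → Spec_get_unrepeated_header_row header_row startrow startcol (get_unrepeated_header_row header_row startrow startcol)

-- ===== LEMMAS AND PROOFS =====

-- the merge range A's state (i, ms, mv) would flush at a run boundary / at the end
def flushA (startrow startcol : Int) (i : Int) (ms : Option Int) (mv : String) : List (Int × Int × Int × String) :=
  match ms with
  | some m => if i + startcol - 1 > m then [(startrow, m, startcol + i - 1, mv)] else []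
  | none => []

def finA (startrow startcol : Int)
    (s : Int × Option Int × String × List String × List (Int × Int × Int × String)) :
    List String × (List (Int × Int × Int × String)) :=
  (s.2.2.2.1, s.2.2.2.2 ++ flushA startrow startcol s.1 s.2.1 s.2.2.1)

def outB (s : Int × String × List String × List (Int × Int × Int × String)) :
    List String × (List (Int × Int × Int × String)) :=
  (s.2.2.1, s.2.2.2)

-- A's loop as structural recursion carrying the previous element explicitly
def fA (startrow startcol : Int) :
    List String → String → (Int × Option Int × String × List String × List (Int × Int × Int × String)) →
    Int × Option Int × String × List String × List (Int × Int × Int × String)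
  | [], _, s => s
  | x :: xs, p, s => fA startrow startcol xs x (stepA startrow startcol s (x, p))

lemma foldl_zip_prev (startrow startcol : Int) (xs : List String) :
    ∀ (p : String) s, (xs.zip (p :: xs.dropLast)).foldl (stepA startrow startcol) s
      = fA startrow startcol xs p s := by
  induction xs with
  | nil => intro p s; rfl
  | cons x xs ih =>
    intro p s
    cases xs with
    | nil => rfl
    | cons y ys =>
      show ((x, p) :: (y :: ys).zip (x :: (y :: ys).dropLast)).foldl (stepA startrow startcol) s = _
      simp only [List.foldl_cons]
      exact ih x _

lemma stepA_dup (startrow startcol : Int) (v : String) (i : Int) (ms : Option Int) (mv : String)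
    (hf : List String) (mr : List (Int × Int × Int × String)) :
    stepA startrow startcol (i, ms, mv, hf, mr) (v, v) = (i + 1, ms, mv, hf ++ [""], mr) := by
  simp [stepA]

lemma stepA_new (startrow startcol : Int) (x p : String) (hx : x ≠ p) (i : Int) (ms : Option Int)
    (mv : String) (hf : List String) (mr : List (Int × Int × Int × String)) :
    stepA startrow startcol (i, ms, mv, hf, mr) (x, p)
      = (i + 1, some (startcol + i), x, hf ++ [x], mr ++ flushA startrow startcol i ms mv) := by
  simp only [stepA, if_neg hx, flushA]
  cases ms with
  | none => simp
  | some m => by_cases h : i + startcol - 1 > m <;> simp [h]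

lemma mem_takeWhile_eq (x : String) (xs : List String) :
    ∀ y ∈ xs.takeWhile (· == x), y = x := by
  intro y hy
  have := List.mem_takeWhile_imp hy
  simpa using this

lemma fA_dups (startrow startcol : Int) (v : String) (t : List String)
    (ht : ∀ y ∈ t, y = v) :
    ∀ (rest : List String) (i : Int) ms mv hf mr,
      fA startrow startcol (t ++ rest) v (i, ms, mv, hf, mr)
      = fA startrow startcol rest v (i + (t.length : Int), ms, mv, hf ++ List.replicate t.length "", mr) := by
  induction t with
  | nil => intro rest i ms mv hf mr; simp
  | cons x ts ih =>
    intro rest i ms mv hf mr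
    have hx : x = v := ht x (by simp)
    have hts : ∀ y ∈ ts, y = v := fun y hy => ht y (by simp [hy])
    subst hx
    show fA startrow startcol (ts ++ rest) x (stepA startrow startcol (i, ms, mv, hf, mr) (x, x)) = _
    rw [stepA_dup, ih hts]
    have h1 : i + 1 + (ts.length : Int) = i + ((ts.length + 1 : Nat) : Int) := by push_cast; ring
    have h2 : (hf ++ [""]) ++ List.replicate ts.length "" = hf ++ List.replicate (ts.length + 1) "" := by
      simp [List.replicate_succ]
    rw [h1, h2]
    rfl

lemma fA_run (startrow startcol : Int) (x : String) (xs : List String) (i : Int) ms mv hf mr :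
    fA startrow startcol xs x (i, ms, mv, hf, mr)
      = fA startrow startcol (xs.dropWhile (· == x)) x
          (i + ((xs.takeWhile (· == x)).length : Int), ms, mv,
           hf ++ List.replicate (xs.takeWhile (· == x)).length "", mr) := by
  conv_lhs => rw [← List.takeWhile_append_dropWhile (p := (· == x)) (l := xs)]
  exact fA_dups startrow startcol x _ (mem_takeWhile_eq x xs) _ i ms mv hf mr

lemma head_dropWhile_ne (x : String) (xs : List String) :
    ∀ y, (xs.dropWhile (· == x)).head? = some y → y ≠ x := by
  induction xs with
  | nil => intro y h; cases h
  | cons z zs ih =>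
    intro y h
    by_cases hz : z = x
    · exact ih y (by simpa [List.dropWhile, hz] using h)
    · have : z = y := by
        have hb : (z == x) = false := by simp [hz]
        simpa [List.dropWhile, hb] using h
      subst this; exact hz

lemma stepB_run (startrow startcol : Int) (x prev : String) (hx : x ≠ prev) (n : Nat) (i : Int)
    (hf : List String) (mr : List (Int × Int × Int × String)) :
    stepB startrow startcol (i, prev, hf, mr) (x, n + 1)
      = (i + 1 + (n : Int), x, hf ++ [x] ++ List.replicate n "",
         mr ++ flushA startrow startcol (i + 1 + (n : Int)) (some (startcol + i)) x) := by
  simp only [stepB, flushA, Nat.add_sub_cancel]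
  refine Prod.ext (by push_cast; ring) (Prod.ext rfl (Prod.ext rfl ?_))
  by_cases hn : 1 ≤ n
  · rw [if_pos ⟨by omega, hx⟩, if_pos (by omega)]
    have : startcol + i + ((n + 1 : Nat) : Int) - 1 = startcol + (i + 1 + (n : Int)) - 1 := by
      push_cast; ring
    rw [this]
  · have hn0 : n = 0 := by omega
    subst hn0
    rw [if_neg (by rintro ⟨h, -⟩; omega), if_neg (by omega)]
    simp

lemma stepB_same (startrow startcol : Int) (v : String) (n : Nat) (i : Int)
    (hf : List String) (mr : List (Int × Int × Int × String)) :
    stepB startrow startcol (i, v, hf, mr) (v, n + 1)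
      = (i + 1 + (n : Int), v, hf ++ [v] ++ List.replicate n "", mr) := by
  simp only [stepB, Nat.add_sub_cancel]
  refine Prod.ext (by push_cast; ring) (Prod.ext rfl (Prod.ext rfl ?_))
  rw [if_neg (by rintro ⟨-, h⟩; exact h rfl)]

lemma runsOf_cons (x : String) (xs : List String) :
    runsOf (x :: xs) = (x, (xs.takeWhile (· == x)).length + 1) :: runsOf (xs.dropWhile (· == x)) := by
  rw [runsOf]

lemma master (startrow startcol : Int) (xs : List String) :
    ∀ (p : String) (i : Int) ms hf mr,
      (∀ y, xs.head? = some y → y ≠ p) →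
      finA startrow startcol (fA startrow startcol xs p (i, ms, p, hf, mr))
      = outB ((runsOf xs).foldl (stepB startrow startcol)
          (i, p, hf, mr ++ flushA startrow startcol i ms p)) := by
  induction xs using runsOf.induct with
  | case1 => intro p i ms hf mr _; simp [fA, runsOf, finA, outB]
  | case2 x xs ih =>
    intro p i ms hf mr hhead
    have hxp : x ≠ p := hhead x rfl
    rw [runsOf_cons, List.foldl_cons, stepB_run startrow startcol x p hxp]
    show finA startrow startcol
        (fA startrow startcol xs x (stepA startrow startcol (i, ms, p, hf, mr) (x, p))) = _
    rw [stepA_new startrow startcol x p hxp, fA_run]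
    exact ih x (i + 1 + ((xs.takeWhile (· == x)).length : Int)) (some (startcol + i))
      ((hf ++ [x]) ++ List.replicate (xs.takeWhile (· == x)).length "")
      (mr ++ flushA startrow startcol i ms p) (head_dropWhile_ne x xs)

lemma A_eq_finA (header_row : List String) (startrow startcol : Int) :
    get_unrepeated_header_row header_row startrow startcol
      = finA startrow startcol (fA startrow startcol header_row "" (0, none, "", [], [])) := by
  unfold get_unrepeated_header_row
  rw [foldl_zip_prev]
  rcases h : fA startrow startcol header_row "" (0, none, "", [], []) with ⟨i, ms, mv, hf, mr⟩
  cases ms with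
  | none => simp [finA, flushA]
  | some m =>
    simp only [finA, flushA]
    split_ifs <;> simp

lemma B_eq_outB (header_row : List String) (startrow startcol : Int) :
    get_unrepeated_header_row_alt header_row startrow startcol
      = outB ((runsOf header_row).foldl (stepB startrow startcol) (0, "", [], [])) := by
  rfl

lemma ab_eq (header_row : List String) (startrow startcol : Int) :
    get_unrepeated_header_row header_row startrow startcol
      = get_unrepeated_header_row_alt header_row startrow startcol := by
  rw [A_eq_finA, B_eq_outB]
  cases header_row with
  | nil => simp [fA, runsOf, finA, outB, flushA]
  | cons x xs =>
    by_cases hx : x = ""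
    · subst hx
      show finA startrow startcol
          (fA startrow startcol xs "" (stepA startrow startcol (0, none, "", [], []) ("", ""))) = _
      rw [stepA_dup, fA_run, runsOf_cons, List.foldl_cons, stepB_same]
      have hm := master startrow startcol (xs.dropWhile (· == "")) ""
        (0 + 1 + ((xs.takeWhile (· == "")).length : Int)) none
        (([] ++ [""]) ++ List.replicate (xs.takeWhile (· == "")).length "") []
        (head_dropWhile_ne "" xs)
      simpa [flushA] using hm
    · have hm := master startrow startcol (x :: xs) "" 0 none [] []
        (fun y hy => by cases hy; exact hx)
      simpa [flushA] using hm

-- ===== VERDICT (by name: the statement is the Claim_ definition above) =====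
theorem get_unrepeated_header_row_spec : Claim_equal_get_unrepeated_header_row := by
  intro header_row startrow startcol _
  unfold Spec_get_unrepeated_header_row
  exact ab_eq header_row startrow startcol
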